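-- pv_equiv track=rewrite | github.com/FranxYao/RDP | src/eval_utils.py | compute_tag_word_dict
-- ===== SOURCE A (Python) =====
-- from collections import Counter, OrderedDict
--
-- def compute_tag_word_dict(tag_all, token_all):
--     tag_word_dict = {}
--     for tags, tokens in zip(tag_all, token_all):
--         for tag, tok in zip(tags, tokens):
--             if(tag not in tag_word_dict): tag_word_dict[tag] = [tok]
--             else: tag_word_dict[tag].append(tok)
--     for t in tag_word_dict: tag_word_dict[t] = Counter(tag_word_dict[t])
--     return tag_word_dict
-- ===== SOURCE B (Python) =====
-- from collections import Counter
--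
-- def compute_tag_word_dict(tag_all, token_all):
--     # Staged, declarative rewrite: flatten everything into one list of
--     # (tag, token) pairs, take the tags in first-occurrence order, and build
--     # each tag's Counter by filtering the flat pair list.
--     pairs = [(tg, tk) for tgs, tks in zip(tag_all, token_all)
--                       for tg, tk in zip(tgs, tks)]
--     tags = list(dict.fromkeys(tg for tg, _ in pairs))
--     return {tg: Counter(tk for t, tk in pairs if t == tg) for tg in tags}
-- ===== Notes on version B (the rewrite author's own statement) =====
-- stated objective: alternative
-- what changed: B replaces A's incremental dict-of-lists grouping pass (plus a second Counter-conversion loop) by a staged declarative pipeline: flatten to one list of (tag, token) pairs, dedupe the tags in first-occurrence order, and build each tag's Counter by filtering the flat pair list; no dict is maintained during any pass. Trades A's O(n) grouping for an O(T*n) filter per distinct tag.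
import Mathlib
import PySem

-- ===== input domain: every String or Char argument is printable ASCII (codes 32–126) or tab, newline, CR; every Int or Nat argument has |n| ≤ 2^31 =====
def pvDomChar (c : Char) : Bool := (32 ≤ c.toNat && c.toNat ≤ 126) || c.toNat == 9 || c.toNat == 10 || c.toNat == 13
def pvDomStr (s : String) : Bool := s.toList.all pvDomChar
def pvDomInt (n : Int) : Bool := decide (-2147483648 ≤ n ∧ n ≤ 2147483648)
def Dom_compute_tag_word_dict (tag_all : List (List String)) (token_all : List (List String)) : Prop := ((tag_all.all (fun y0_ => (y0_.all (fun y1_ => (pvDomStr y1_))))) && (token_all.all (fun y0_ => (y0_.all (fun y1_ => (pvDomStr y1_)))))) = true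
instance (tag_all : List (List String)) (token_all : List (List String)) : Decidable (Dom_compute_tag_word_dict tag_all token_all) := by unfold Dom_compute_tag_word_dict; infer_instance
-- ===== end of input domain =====

-- B replaces A's incremental dict-of-lists grouping + second conversion loop by a staged
-- pipeline (flatten to pairs, dedupe tags, per-tag filter + Counter); alternative decomposition.

-- ===== PORT A =====
-- literal port of A: grow per-tag token lists in a dict, then convert each value to a Counter
def compute_tag_word_dict (tag_all : List (List String)) (token_all : List (List String)) : List (String × List (String × Int)) :=
  let d := (tag_all.zip token_all).foldl
    (fun d tt => (tt.1.zip tt.2).foldl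
      (fun d q =>
        if d.contains q.1 then d.modify q.1 [] (fun xs => xs ++ [q.2])
        else d.insert q.1 [q.2]) d)
    PySem.Dict.empty
  -- 'for t in d: d[t] = Counter(d[t])' replaces each value in place, order kept
  d.items.map (fun p => (p.1, (PySem.Dict.counter p.2).items))

-- ===== PORT B =====
-- literal port of B: flat pair list; list(dict.fromkeys(…)) is PySem.List.dedup;
-- per-tag dict-comprehension value Counter(tk for t, tk in pairs if t == tg)
def compute_tag_word_dict_alt (tag_all : List (List String)) (token_all : List (List String)) : List (String × List (String × Int)) :=
  let pairs := (tag_all.zip token_all).flatMap (fun tt => tt.1.zip tt.2)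
  let tags := PySem.List.dedup (pairs.map (fun p => p.1))
  tags.map (fun tg =>
    (tg, (PySem.Dict.counter ((pairs.filter (fun p => p.1 == tg)).map (fun p => p.2))).items))

-- ===== PRECONDITION & SPEC =====
def Spec_compute_tag_word_dict (tag_all : List (List String)) (token_all : List (List String)) (out : List (String × List (String × Int))) : Prop := out = compute_tag_word_dict_alt tag_all token_all
instance (tag_all : List (List String)) (token_all : List (List String)) (out : List (String × List (String × Int))) : Decidable (Spec_compute_tag_word_dict tag_all token_all out) := by unfold Spec_compute_tag_word_dict; infer_instance

-- ===== CLAIM (what is proved, stated in full; the proofs are below) =====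
def Claim_equal_compute_tag_word_dict : Prop := ∀ (tag_all : List (List String)) (token_all : List (List String)), Dom_compute_tag_word_dict tag_all token_all → Spec_compute_tag_word_dict tag_all token_all (compute_tag_word_dict tag_all token_all)

-- ===== LEMMAS AND PROOFS =====

-- A's branch 'if contains then append else insert [tok]' IS Dict.modify with default []
theorem pv_stepA_eq (d : PySem.Dict String (List String)) (q : String × String) :
    (if d.contains q.1 then d.modify q.1 [] (fun xs => xs ++ [q.2])
     else d.insert q.1 [q.2])
      = d.modify q.1 [] (fun xs => xs ++ [q.2]) := by
  by_cases h : d.contains q.1 = true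
  · simp [h]
  · have h' : d.contains q.1 = false := by simpa using h
    simp [h', PySem.Dict.modify, PySem.Dict.getD_of_not_contains d [] h']

-- A's nested fold over zipped sentences = the same fold over the flattened pair list
theorem pv_fold_flat (zl : List (List String × List String))
    (d : PySem.Dict String (List String)) :
    zl.foldl (fun d tt => (tt.1.zip tt.2).foldl
        (fun d q => if d.contains q.1 then d.modify q.1 [] (fun xs => xs ++ [q.2])
                    else d.insert q.1 [q.2]) d) d
      = (zl.flatMap (fun tt => tt.1.zip tt.2)).foldl
          (fun d q => d.modify q.1 [] (fun xs => xs ++ [q.2])) d := by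
  have hfun : (fun (d : PySem.Dict String (List String)) (q : String × String) =>
      if d.contains q.1 then d.modify q.1 [] (fun xs => xs ++ [q.2])
      else d.insert q.1 [q.2])
        = fun d q => d.modify q.1 [] (fun xs => xs ++ [q.2]) :=
    funext fun d => funext fun q => pv_stepA_eq d q
  simp only [hfun]
  induction zl generalizing d with
  | nil => rfl
  | cons tt zl ih =>
      simp only [List.foldl_cons, List.flatMap_cons, List.foldl_append, ih]

-- ===== VERDICT (by name: the statement is the Claim_ definition above) =====
theorem compute_tag_word_dict_spec : Claim_equal_compute_tag_word_dict := by
  intro tag_all token_all _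
  unfold Spec_compute_tag_word_dict compute_tag_word_dict compute_tag_word_dict_alt
  simp only [pv_fold_flat]
  set l := (tag_all.zip token_all).flatMap (fun tt => tt.1.zip tt.2) with hl
  have hnd : ((l.foldl (fun d q => d.modify q.1 [] (fun xs => xs ++ [q.2]))
      PySem.Dict.empty).keys).Nodup := by
    exact PySem.Dict.nodup_keys_foldl_modify_key l Prod.fst [] (fun _ q xs => xs ++ [q.2])
      PySem.Dict.empty (by simp)
  rw [PySem.Dict.items_eq_map_keys _ hnd []]
  rw [PySem.Dict.keys_foldl_modify_key]
  simp only [List.map_map, Function.comp_def, PySem.Dict.getD_foldl_modify_append,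
    PySem.Dict.getD_empty, List.nil_append, PySem.Dict.keys_empty]
  rfl
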